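-- pv_equiv track=rewrite | github.com/Kutay1907/ebat-drop-shipping-spy- | app/search_routes.py | categorize_demand_distribution
-- ===== SOURCE A (Python) =====
-- def categorize_demand_distribution(watch_counts):
--     high = len([w for w in watch_counts if w > 20])
--     medium = len([w for w in watch_counts if 5 < w <= 20])
--     low = len([w for w in watch_counts if 0 < w <= 5])
--     none = len([w for w in watch_counts if w == 0])
--
--     return {
--         "high_demand": high,
--         "medium_demand": medium,
--         "low_demand": low,
--         "no_watchers": none
--     }
-- ===== SOURCE B (Python) =====
-- def categorize_demand_distribution(watch_counts):
--     high = medium = low = none = 0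
--     for w in watch_counts:
--         if w > 20:
--             high += 1
--         elif w > 5:
--             medium += 1
--         elif w > 0:
--             low += 1
--         elif w == 0:
--             none += 1
--     return {
--         "high_demand": high,
--         "medium_demand": medium,
--         "low_demand": low,
--         "no_watchers": none
--     }
-- ===== Notes on version B (the rewrite author's own statement) =====
-- stated objective: faster
-- what changed: Replaces four separate filtering passes over watch_counts with a single loop maintaining four running counters via an if/elif chain.
import Mathlib
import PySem

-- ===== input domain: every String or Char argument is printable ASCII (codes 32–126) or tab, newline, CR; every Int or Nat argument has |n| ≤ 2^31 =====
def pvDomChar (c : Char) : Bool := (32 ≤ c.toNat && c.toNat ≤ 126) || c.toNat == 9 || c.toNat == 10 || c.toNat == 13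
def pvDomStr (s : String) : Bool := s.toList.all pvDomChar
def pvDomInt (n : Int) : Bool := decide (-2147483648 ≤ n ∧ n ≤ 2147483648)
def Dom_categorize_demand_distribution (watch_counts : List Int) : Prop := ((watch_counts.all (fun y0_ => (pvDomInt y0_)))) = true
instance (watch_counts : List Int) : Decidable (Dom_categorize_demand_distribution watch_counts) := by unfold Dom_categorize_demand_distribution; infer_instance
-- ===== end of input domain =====

-- B replaces A's four separate filtering passes with one loop over four running counters (objective: faster by constant factor).

-- ===== PORT A =====
def categorize_demand_distribution (watch_counts : List Int) : List (String × Int) :=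
  let high : Int := (watch_counts.filter (fun w => w > 20)).length
  let medium : Int := (watch_counts.filter (fun w => 5 < w ∧ w ≤ 20)).length
  let low : Int := (watch_counts.filter (fun w => 0 < w ∧ w ≤ 5)).length
  let none : Int := (watch_counts.filter (fun w => w = 0)).length
  [("high_demand", high), ("medium_demand", medium), ("low_demand", low), ("no_watchers", none)]

-- ===== PORT B =====
-- single pass keeping (high, medium, low, none) counters, if/elif chain with no final else
def categorize_demand_distribution_alt (watch_counts : List Int) : List (String × Int) :=
  let c := watch_counts.foldl
    (fun (acc : Int × Int × Int × Int) (w : Int) =>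
      let (h, m, l, n) := acc
      if w > 20 then (h + 1, m, l, n)
      else if w > 5 then (h, m + 1, l, n)
      else if w > 0 then (h, m, l + 1, n)
      else if w = 0 then (h, m, l, n + 1)
      else (h, m, l, n))
    (0, 0, 0, 0)
  [("high_demand", c.1), ("medium_demand", c.2.1), ("low_demand", c.2.2.1), ("no_watchers", c.2.2.2)]

-- ===== PRECONDITION & SPEC =====
def Spec_categorize_demand_distribution (watch_counts : List Int) (out : List (String × Int)) : Prop := out = categorize_demand_distribution_alt watch_counts
instance (watch_counts : List Int) (out : List (String × Int)) : Decidable (Spec_categorize_demand_distribution watch_counts out) := by unfold Spec_categorize_demand_distribution; infer_instance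

-- ===== CLAIM (what is proved, stated in full; the proofs are below) =====
def Claim_equal_categorize_demand_distribution : Prop := ∀ (watch_counts : List Int), Dom_categorize_demand_distribution watch_counts → Spec_categorize_demand_distribution watch_counts (categorize_demand_distribution watch_counts)

-- ===== LEMMAS AND PROOFS =====

-- loop invariant: the fold starting from arbitrary counters adds the four filter-lengths componentwise
theorem pv_fold_counts (xs : List Int) (h m l n : Int) :
    xs.foldl
      (fun (acc : Int × Int × Int × Int) (w : Int) =>
        let (h, m, l, n) := acc
        if w > 20 then (h + 1, m, l, n)
        else if w > 5 then (h, m + 1, l, n)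
        else if w > 0 then (h, m, l + 1, n)
        else if w = 0 then (h, m, l, n + 1)
        else (h, m, l, n))
      (h, m, l, n)
    = (h + (xs.filter (fun w => w > 20)).length,
       m + (xs.filter (fun w => 5 < w ∧ w ≤ 20)).length,
       l + (xs.filter (fun w => 0 < w ∧ w ≤ 5)).length,
       n + (xs.filter (fun w => w = 0)).length) := by
  induction xs generalizing h m l n with
  | nil => simp
  | cons x xs ih =>
    simp only [List.foldl_cons, List.filter_cons, decide_eq_true_eq]
    split_ifs <;> simp [ih] <;> omega

-- ===== VERDICT (by name: the statement is the Claim_ definition above) =====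
theorem categorize_demand_distribution_spec : Claim_equal_categorize_demand_distribution := by
  intro xs _
  unfold Spec_categorize_demand_distribution categorize_demand_distribution
    categorize_demand_distribution_alt
  simp [pv_fold_counts]
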